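-- pv_equiv track=rewrite | github.com/cristianpividori17-dotcom/tennis-mvp-backend | collector_fallback.py | get_general_surface_label
-- ===== SOURCE A (Python) =====
-- def normalize_surface_label(surface):
--     if not surface:
--         return None
--
--     text = str(surface).strip()
--     if not text:
--         return None
--
--     lowered = text.lower()
--
--     if lowered in ("synthetic", "synthetic grass", "syngrass", "syn grass"):
--         return "Synthetic Grass"
--     if lowered in ("hard court", "hardcourt", "hard", "plexicushion"):
--         return "Hard Court"
--     if lowered == "grass":
--         return "Grass"
--     if lowered == "clay":
--         return "Clay"
--     if lowered == "mixed surfaces":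
--         return "Mixed Surfaces"
--     if lowered == "surface not available":
--         return "Surface not available"
--
--     return text
--
-- def get_general_surface_label(court_objects, fallback_surface=None):
--     surfaces = [court["surface"] for court in court_objects if court.get("surface")]
--     unique_surfaces = sorted(set(surfaces))
--
--     if len(unique_surfaces) == 0:
--         if fallback_surface:
--             return normalize_surface_label(fallback_surface)
--         return "Surface not available"
--
--     if len(unique_surfaces) == 1:
--         return unique_surfaces[0]
--
--     return "Mixed Surfaces"
-- ===== SOURCE B (Python) =====
-- def normalize_surface_label(surface):
--     if not surface:
--         return None
--
--     text = str(surface).strip()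
--     if not text:
--         return None
--
--     lowered = text.lower()
--
--     if lowered in ("synthetic", "synthetic grass", "syngrass", "syn grass"):
--         return "Synthetic Grass"
--     if lowered in ("hard court", "hardcourt", "hard", "plexicushion"):
--         return "Hard Court"
--     if lowered == "grass":
--         return "Grass"
--     if lowered == "clay":
--         return "Clay"
--     if lowered == "mixed surfaces":
--         return "Mixed Surfaces"
--     if lowered == "surface not available":
--         return "Surface not available"
--
--     return text
--
--
-- def get_general_surface_label(court_objects, fallback_surface=None):
--     seen = None
--     for court in court_objects:
--         surface = court.get("surface")
--         if not surface:
--             continue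
--         if seen is None:
--             seen = surface
--         elif surface != seen:
--             return "Mixed Surfaces"
--     if seen is not None:
--         return seen
--     return normalize_surface_label(fallback_surface) or "Surface not available"
-- ===== Notes on version B (the rewrite author's own statement) =====
-- stated objective: alternative
-- what changed: Replaces A's list-comprehension + set() + sorted() pipeline with a single early-exit pass keeping one `seen` surface, returning 'Mixed Surfaces' as soon as a second distinct surface appears; the fallback becomes `normalize_surface_label(fallback_surface) or 'Surface not available'`.
-- outside the precondition, e.g. on get_general_surface_label([], ' '): A returns None, B returns 'Surface not available'; on get_general_surface_label([{'surface': ''}], '\t '): A returns None, B returns 'Surface not available'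
import Mathlib
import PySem

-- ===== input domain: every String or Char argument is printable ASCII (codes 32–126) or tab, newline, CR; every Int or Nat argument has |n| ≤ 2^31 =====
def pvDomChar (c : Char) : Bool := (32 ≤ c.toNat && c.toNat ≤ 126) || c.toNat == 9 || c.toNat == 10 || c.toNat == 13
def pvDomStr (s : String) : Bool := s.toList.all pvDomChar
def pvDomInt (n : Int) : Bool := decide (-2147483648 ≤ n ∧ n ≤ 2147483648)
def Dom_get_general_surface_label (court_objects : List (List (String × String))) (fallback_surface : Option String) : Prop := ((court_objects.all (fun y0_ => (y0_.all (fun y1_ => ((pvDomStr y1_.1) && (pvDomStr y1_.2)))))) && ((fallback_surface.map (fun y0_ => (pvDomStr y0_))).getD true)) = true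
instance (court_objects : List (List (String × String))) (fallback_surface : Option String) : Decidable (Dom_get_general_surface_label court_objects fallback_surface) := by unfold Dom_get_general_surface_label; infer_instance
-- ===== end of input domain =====

-- B replaces A's build-list / set / sort pipeline by a single early-exit pass holding one `seen` value; same return value wherever A returns a string (A's None-return corner is excluded by Pre_).

-- ===== PORT A =====
-- shared helper of both Pythons: normalize_surface_label (returns none where Python returns None)
def normalize_surface_label (surface : Option String) : Option String :=
  match surface with
  | none => none
  | some sv =>
    if sv = "" then none
    else
      let text := PySem.Str.strip sv
      if text = "" then none
      else
        let lowered := PySem.Str.lower text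
        if lowered = "synthetic" ∨ lowered = "synthetic grass" ∨ lowered = "syngrass" ∨ lowered = "syn grass" then some "Synthetic Grass"
        else if lowered = "hard court" ∨ lowered = "hardcourt" ∨ lowered = "hard" ∨ lowered = "plexicushion" then some "Hard Court"
        else if lowered = "grass" then some "Grass"
        else if lowered = "clay" then some "Clay"
        else if lowered = "mixed surfaces" then some "Mixed Surfaces"
        else if lowered = "surface not available" then some "Surface not available"
        else some text

-- [court["surface"] for court in court_objects if court.get("surface")]
def surfacesOf (court_objects : List (List (String × String))) : List String :=
  court_objects.filterMap (fun court =>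
    match (PySem.Dict.mk court).get? "surface" with
    | some s => if s = "" then none else some s
    | none => none)

def get_general_surface_label (court_objects : List (List (String × String))) (fallback_surface : Option String) : String :=
  let surfaces := surfacesOf court_objects
  let unique_surfaces := PySem.List.sorted (PySem.Set.ofList surfaces) (fun x => x) false
  if unique_surfaces.length = 0 then
    match fallback_surface with
    | some f =>
      if f = "" then "Surface not available"
      -- Python returns normalize_surface_label(fallback_surface), which is None (not a str)
      -- when the fallback strips to empty; that input is outside Pre_, the ".getD" is arbitrary.
      else (normalize_surface_label (some f)).getD ""
    | none => "Surface not available"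
  else if unique_surfaces.length = 1 then
    (PySem.List.pyGet? unique_surfaces 0).getD ""
  else "Mixed Surfaces"

-- ===== PORT B =====
def get_general_surface_label_altGo (fallback_surface : Option String) :
    List (List (String × String)) → Option String → String
  | [], seen =>
    match seen with
    | some t => t
    | none =>
      -- normalize_surface_label(fallback_surface) or "Surface not available"
      match normalize_surface_label fallback_surface with
      | some x => if x = "" then "Surface not available" else x
      | none => "Surface not available"
  | court :: rest, seen =>
    match (PySem.Dict.mk court).get? "surface" with
    | some s =>
      if s = "" then get_general_surface_label_altGo fallback_surface rest seen
      else
        match seen with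
        | none => get_general_surface_label_altGo fallback_surface rest (some s)
        | some t => if s ≠ t then "Mixed Surfaces" else get_general_surface_label_altGo fallback_surface rest (some t)
    | none => get_general_surface_label_altGo fallback_surface rest seen

def get_general_surface_label_alt (court_objects : List (List (String × String))) (fallback_surface : Option String) : String :=
  get_general_surface_label_altGo fallback_surface court_objects none

-- ===== PRECONDITION & SPEC =====
-- Pre_ excludes exactly the inputs on which A returns None (not a string): every court surface
-- falsy AND the fallback a non-empty string that strips to empty (whitespace only).
def Pre_get_general_surface_label (court_objects : List (List (String × String))) (fallback_surface : Option String) : Prop :=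
  ((fallback_surface.map (fun f => f == "" || PySem.Str.strip f != "")).getD true) = true ∨
  ∃ court ∈ court_objects, ((PySem.Dict.mk court).get? "surface").getD "" ≠ ""
instance (court_objects : List (List (String × String))) (fallback_surface : Option String) : Decidable (Pre_get_general_surface_label court_objects fallback_surface) := by unfold Pre_get_general_surface_label; infer_instance

def pvWitness_get_general_surface_label : (List (List (String × String))) × Option String :=
  ([[("surface", "Clay")]], some " ")

def Spec_get_general_surface_label (court_objects : List (List (String × String))) (fallback_surface : Option String) (out : String) : Prop := out = get_general_surface_label_alt court_objects fallback_surface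
instance (court_objects : List (List (String × String))) (fallback_surface : Option String) (out : String) : Decidable (Spec_get_general_surface_label court_objects fallback_surface out) := by unfold Spec_get_general_surface_label; infer_instance

-- ===== CLAIM (what is proved, stated in full; the proofs are below) =====
def Claim_equal_get_general_surface_label : Prop := ∀ (court_objects : List (List (String × String))) (fallback_surface : Option String), Dom_get_general_surface_label court_objects fallback_surface → Pre_get_general_surface_label court_objects fallback_surface → Spec_get_general_surface_label court_objects fallback_surface (get_general_surface_label court_objects fallback_surface)

-- ===== LEMMAS AND PROOFS =====

lemma surfacesOf_nil : surfacesOf [] = [] := rfl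

lemma surfacesOf_cons (c : List (String × String)) (r : List (List (String × String))) :
    surfacesOf (c :: r) =
      (match (PySem.Dict.mk c).get? "surface" with
       | some s => if s = "" then surfacesOf r else s :: surfacesOf r
       | none => surfacesOf r) := by
  simp only [surfacesOf, List.filterMap_cons]
  cases (PySem.Dict.mk c).get? "surface" with
  | none => rfl
  | some s => by_cases h : s = "" <;> simp [h]

-- the fallback expression B computes when no truthy surface was seen
def pvFb (fallback_surface : Option String) : String :=
  match normalize_surface_label fallback_surface with
  | some x => if x = "" then "Surface not available" else x
  | none => "Surface not available"

lemma altGo_some (fb : Option String) :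
    ∀ (co : List (List (String × String))) (t : String),
      get_general_surface_label_altGo fb co (some t) =
        if ∀ x ∈ surfacesOf co, x = t then t else "Mixed Surfaces" := by
  intro co
  induction co with
  | nil => intro t; simp [get_general_surface_label_altGo, surfacesOf_nil]
  | cons c r ih =>
    intro t
    cases hg : (PySem.Dict.mk c).get? "surface" with
    | none =>
      simp only [get_general_surface_label_altGo, hg, surfacesOf_cons]
      exact ih t
    | some s =>
      simp only [get_general_surface_label_altGo, hg, surfacesOf_cons]
      by_cases hs : s = ""
      · simp only [if_pos hs]; exact ih t
      · by_cases hst : s = t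
        · subst hst
          rw [if_neg hs, if_neg hs, if_neg (by simp), ih s]
          by_cases hall : ∀ x ∈ surfacesOf r, x = s
          · rw [if_pos hall, if_pos (by
              intro x hx
              rcases List.mem_cons.1 hx with h | h
              · exact h
              · exact hall x h)]
          · rw [if_neg hall, if_neg (by intro h; exact hall (fun x hx => h x (List.mem_cons.2 (Or.inr hx))))]
        · rw [if_neg hs, if_neg hs, if_pos hst,
            if_neg (by intro h; exact hst (h s (List.mem_cons_self)))]

lemma altGo_none (fb : Option String) :
    ∀ (co : List (List (String × String))),
      get_general_surface_label_altGo fb co none =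
        (match surfacesOf co with
         | [] => pvFb fb
         | s :: rest => if ∀ x ∈ rest, x = s then s else "Mixed Surfaces") := by
  intro co
  induction co with
  | nil => simp [get_general_surface_label_altGo, surfacesOf_nil, pvFb]
  | cons c r ih =>
    cases hg : (PySem.Dict.mk c).get? "surface" with
    | none =>
      simp only [get_general_surface_label_altGo, hg, surfacesOf_cons]
      exact ih
    | some s =>
      simp only [get_general_surface_label_altGo, hg, surfacesOf_cons]
      by_cases hs : s = ""
      · simp only [if_pos hs]; exact ih
      · rw [if_neg hs, if_neg hs, altGo_some fb r s]

-- a set built from a constant nonempty list is the singleton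
lemma foldl_add_const {s : String} : ∀ (L : List String), (∀ x ∈ L, x = s) →
    L.foldl PySem.Set.add [s] = [s] := by
  intro L
  induction L with
  | nil => intro _; rfl
  | cons x r ih =>
    intro h
    have hx : x = s := h x (by simp)
    subst hx
    have hadd : PySem.Set.add [x] x = [x] := by simp [PySem.Set.add, PySem.Set.contains]
    simp only [List.foldl_cons, hadd]
    exact ih (fun y hy => h y (by simp [hy]))

lemma ofList_const {s : String} (rest : List String) (h : ∀ x ∈ rest, x = s) :
    PySem.Set.ofList (s :: rest) = [s] := by
  rw [PySem.Set.ofList_eq_foldl]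
  simp only [List.foldl_cons]
  rw [show PySem.Set.add [] s = [s] from rfl]
  exact foldl_add_const rest h

lemma two_ne_mem_length {α : Type} {a b : α} {l : List α} (ha : a ∈ l) (hb : b ∈ l)
    (h : a ≠ b) : 1 < l.length := by
  match l with
  | [] => cases ha
  | [x] => simp at ha hb; subst ha; subst hb; exact absurd rfl h
  | x :: y :: t => simp

-- surfaces empty ↔ every court surface falsy
lemma surfacesOf_eq_nil_iff (co : List (List (String × String))) :
    surfacesOf co = [] ↔ ∀ court ∈ co, ((PySem.Dict.mk court).get? "surface").getD "" = "" := by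
  induction co with
  | nil => simp [surfacesOf_nil]
  | cons c r ih =>
    rw [surfacesOf_cons]
    cases hg : (PySem.Dict.mk c).get? "surface" with
    | none => simp [hg, ih]
    | some s =>
      by_cases hs : s = "" <;> simp [hs, hg, ih]

-- normalize of a non-falsy, non-whitespace-only string is a nonempty string
lemma normalize_nonempty {f : String} (hf : f ≠ "") (hst : PySem.Str.strip f ≠ "") :
    ∃ x, normalize_surface_label (some f) = some x ∧ x ≠ "" := by
  unfold normalize_surface_label
  simp only [hf, if_false, hst, if_false]
  split_ifs <;> exact ⟨_, rfl, by first | decide | exact hst⟩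

theorem get_general_surface_label_eq (co : List (List (String × String))) (fb : Option String)
    (hpre : Pre_get_general_surface_label co fb) :
    get_general_surface_label co fb = get_general_surface_label_alt co fb := by
  unfold get_general_surface_label get_general_surface_label_alt
  dsimp only
  rw [altGo_none]
  cases hS : surfacesOf co with
  | nil =>
    rw [show PySem.List.sorted (PySem.Set.ofList ([] : List String)) (fun x => x) false = [] from rfl]
    rw [if_pos (show ([] : List String).length = 0 from rfl)]
    -- Pre_'s second disjunct is false here: every court surface is falsy
    have hfb : ∀ f, fb = some f → f = "" ∨ PySem.Str.strip f ≠ "" := by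
      intro f hf
      rcases hpre with h | ⟨court, hc, hne⟩
      · subst hf; simp only [Option.map_some, Option.getD_some] at h
        rcases Bool.or_eq_true_iff.1 h with h' | h'
        · exact Or.inl (by simpa using h')
        · exact Or.inr (by simpa using h')
      · exact absurd ((surfacesOf_eq_nil_iff co).1 hS court hc) hne
    cases fb with
    | none => simp [pvFb, normalize_surface_label]
    | some f =>
      by_cases hf : f = ""
      · subst hf; simp [pvFb, normalize_surface_label]
      · rcases hfb f rfl with h' | hst
        · exact absurd h' hf
        · obtain ⟨x, hx, hxne⟩ := normalize_nonempty hf hst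
          simp [hf, pvFb, hx, hxne]
  | cons s rest =>
    by_cases hall : ∀ x ∈ rest, x = s
    · -- single unique surface
      have hsorted : PySem.List.sorted (PySem.Set.ofList (s :: rest)) (fun x => x) false = [s] := by
        rw [ofList_const rest hall]; rfl
      rw [hsorted, if_neg (by simp), if_pos (by simp)]
      have hget : (PySem.List.pyGet? [s] (0 : Int)).getD "" = s := by
        simp [PySem.List.pyGet?, PySem.List.pyIdx?]
      rw [hget]
      exact (if_pos hall).symm
    · -- at least two distinct surfaces
      push Not at hall
      obtain ⟨t, ht, hts⟩ := hall
      have hs_mem : s ∈ PySem.Set.ofList (s :: rest) := (PySem.Set.mem_ofList _ _).2 (by simp)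
      have ht_mem : t ∈ PySem.Set.ofList (s :: rest) := (PySem.Set.mem_ofList _ _).2 (by simp [ht])
      have hlen : 1 < (PySem.Set.ofList (s :: rest)).length :=
        two_ne_mem_length hs_mem ht_mem (fun h => hts h.symm)
      rw [PySem.List.length_sorted, if_neg (by omega), if_neg (by omega)]
      exact (if_neg (fun h => hts (h t ht))).symm

-- ===== VERDICT (by name: the statement is the Claim_ definition above) =====
theorem get_general_surface_label_spec : Claim_equal_get_general_surface_label := by
  intro co fb _ hpre
  unfold Spec_get_general_surface_label
  exact get_general_surface_label_eq co fb hpre
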